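-- pv_equiv track=rewrite | github.com/MValaguz/MSql | source/utilita_testo.py | extract_sql_under_cursor
-- ===== SOURCE A (Python) =====
-- def extract_sql_under_cursor(p_testo: str, p_cursor_pos: int):
--     """
--     ATTENZIONE! Funzione che verrà sostituita da extract_section_under_cursor, quindi obsoleta
--
--     Estrae l'istruzione SQL sotto p_cursor_pos in p_testo,
--     considerando come separatori i caratteri ';' e '/' ma trattando '/'
--     come terminatore solo se, tolti spazi/tab, è l’unico carattere
--     sulla riga. Ignora i separatori dentro commenti block (/*...*/) o
--     single-line (--...).
--
--     Ritorna (statement, start_idx, end_idx).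
--     """
--     text = p_testo
--     n = len(text)
--
--     # 1) Clamp del cursore
--     if p_cursor_pos > n:
--         p_cursor_pos = n
--     if p_cursor_pos < 0:
--         p_cursor_pos = 0
--
--     # 2) Se sotto il cursore ci sono spazi o OOB, scendo a sinistra
--     pos = p_cursor_pos
--     if pos == n or text[pos].isspace():
--         i = n - 1 if pos == n else pos
--         while i >= 0 and text[i].isspace():
--             i -= 1
--         if i < 0:
--             return "", 0, 0
--         pos = i
--
--     # 3) Costruisco maschera commenti block e single-line
--     comment_mask = [False] * n
--     i = 0
--     while i < n:
--         if i + 1 < n and text[i:i+2] == '/*':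
--             j = text.find('*/', i+2)
--             end_c = (j + 2) if j != -1 else n
--             for k in range(i, end_c):
--                 comment_mask[k] = True
--             i = end_c
--         elif i + 1 < n and text[i:i+2] == '--':
--             j = text.find('\n', i+2)
--             end_c = j if j != -1 else n
--             for k in range(i, end_c):
--                 comment_mask[k] = True
--             i = end_c
--         else:
--             i += 1
--
--     # Helper: '/' è reale solo se, tolti whitespace, è l'unico char sulla riga
--     def is_real_slash(idx: int) -> bool:
--         line_start = text.rfind('\n', 0, idx) + 1
--         line_end = text.find('\n', idx)
--         if line_end == -1:
--             line_end = n
--         return text[line_start:line_end].strip() == '/'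
--
--     # 4) Trovo inizio istruzione (scan backwards)
--     start = pos
--     # se siamo su delimitatore reale, skip
--     c0 = text[start]
--     if not comment_mask[start] and (c0 == ';' or (c0 == '/' and is_real_slash(start))):
--         start -= 1
--
--     while start > 0:
--         c = text[start-1]
--         if not comment_mask[start-1] and (c == ';' or (c == '/' and is_real_slash(start-1))):
--             break
--         start -= 1
--
--     # 5) Trovo fine istruzione (scan forwards)
--     end = pos + 1
--     while end < n:
--         c = text[end]
--         if not comment_mask[end] and (c == ';' or (c == '/' and is_real_slash(end))):
--             break
--         end += 1
--
--     # 6) Estraggo e trimmo bordi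
--     raw = text[start:end]
--     trim_chars = {' ', '\t', '\r', '\n', ';', '/'}
--     left = 0
--     while left < len(raw) and raw[left] in trim_chars:
--         left += 1
--     right = len(raw)
--     while right > left and raw[right-1] in trim_chars:
--         right -= 1
--
--     statement = raw[left:right]
--     final_start = start + left
--     final_end = start + right
--
--     return statement, final_start, final_end
-- ===== SOURCE B (Python) =====
-- def extract_sql_under_cursor(p_testo: str, p_cursor_pos: int):
--     """
--     One-pass re-implementation: the comment mask is built once, then every line
--     is visited exactly once to collect the real separator positions (';' outside
--     comments, '/' outside comments on a slash-only line) into a sorted list;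
--     the statement bounds come from two binary searches in that list, and the
--     edge trimming is done with lstrip/rstrip instead of index loops.
--     Returns (statement, start_idx, end_idx).
--     """
--     text = p_testo
--     n = len(text)
--
--     # clamp cursor
--     p = p_cursor_pos
--     if p > n:
--         p = n
--     if p < 0:
--         p = 0
--
--     # effective position: last non-space at or left of the cursor
--     if p == n or text[p].isspace():
--         t = text[: (n if p == n else p + 1)].rstrip()
--         if not t:
--             return "", 0, 0
--         pos = len(t) - 1
--     else:
--         pos = p
--
--     # comment mask (block /*...*/ and single-line --...)
--     comment_mask = [False] * n
--     i = 0
--     while i < n: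
--         if i + 1 < n and text[i:i+2] == '/*':
--             j = text.find('*/', i + 2)
--             end_c = (j + 2) if j != -1 else n
--             for k in range(i, end_c):
--                 comment_mask[k] = True
--             i = end_c
--         elif i + 1 < n and text[i:i+2] == '--':
--             j = text.find('\n', i + 2)
--             end_c = j if j != -1 else n
--             for k in range(i, end_c):
--                 comment_mask[k] = True
--             i = end_c
--         else:
--             i += 1
--
--     # one pass over the lines: collect every real separator position, in order
--     seps = []
--     cur = 0
--     while cur < n:
--         e = text.find('\n', cur)
--         if e == -1:
--             e = n
--         slash_only = text[cur:e].strip() == '/'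
--         for k in range(cur, e):
--             c = text[k]
--             if not comment_mask[k] and (c == ';' or (c == '/' and slash_only)):
--                 seps.append(k)
--         cur = e + 1
--
--     def bl(a, x):
--         # hand-written bisect_left
--         lo, hi = 0, len(a)
--         while lo < hi:
--             mid = (lo + hi) // 2
--             if a[mid] < x:
--                 lo = mid + 1
--             else:
--                 hi = mid
--         return lo
--
--     # statement bounds by binary search in seps
--     j = bl(seps, pos)
--     init = pos - 1 if (j < len(seps) and seps[j] == pos) else pos
--     k = bl(seps, init)
--     start = seps[k - 1] + 1 if k > 0 else 0
--     m = bl(seps, pos + 1)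
--     end = seps[m] if m < len(seps) else n
--
--     # trim the edges
--     TRIM = " \t\r\n;/"
--     raw = text[start:end]
--     s1 = raw.lstrip(TRIM)
--     left = len(raw) - len(s1)
--     stripped = s1.rstrip(TRIM)
--     return stripped, start + left, start + left + len(stripped)
-- ===== Notes on version B (the rewrite author's own statement) =====
-- stated objective: alternative
-- what changed: Instead of re-deriving the line around every scanned character (rfind/find/strip per call of is_real_slash), B walks the lines once, computing each line's slash-only flag a single time and collecting all real separator positions into one sorted list, then locates the statement bounds with two hand-written binary searches and trims the edges with lstrip/rstrip.
-- intended difference: When the effective cursor position is 0 and text[0] is itself a real separator (';' or a slash-only first line), A sets start=-1 and slices text[-1:end] (Python wraps the negative index), returning a statement cut from the wrong end with offsets shifted to -1 (e.g. (';a',0) -> ('a',-1,0)); B starts the statement at index 0 (('a',1,2)), which is the intended reading. — e.g. on extract_sql_under_cursor(";a", 0): A returns ("a", -1, 0), B returns ("a", 1, 2)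
import Mathlib
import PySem

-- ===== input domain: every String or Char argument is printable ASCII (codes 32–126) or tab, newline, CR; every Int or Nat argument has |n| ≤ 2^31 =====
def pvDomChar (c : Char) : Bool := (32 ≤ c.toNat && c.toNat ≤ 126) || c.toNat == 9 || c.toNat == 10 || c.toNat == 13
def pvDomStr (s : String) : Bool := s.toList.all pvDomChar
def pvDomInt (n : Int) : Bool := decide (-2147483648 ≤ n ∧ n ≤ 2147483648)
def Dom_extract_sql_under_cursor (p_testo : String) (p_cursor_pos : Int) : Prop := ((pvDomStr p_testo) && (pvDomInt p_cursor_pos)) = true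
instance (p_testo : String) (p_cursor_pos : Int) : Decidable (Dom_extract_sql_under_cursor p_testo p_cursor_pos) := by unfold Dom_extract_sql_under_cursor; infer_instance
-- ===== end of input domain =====

-- B replaces A's per-character `is_real_slash` rescans with one pass over the lines that
-- collects all separator positions, then finds the statement bounds by binary search.
-- Every while-loop below is written as structural recursion on a fuel counter that the
-- call site instantiates with an upper bound on the number of iterations (exact: with
-- enough fuel the recursion stops on the loop condition, never on the fuel).

-- ===== PORT A =====
-- Low-level helpers shared by both ports (the comment mask is built by the same code in
-- A and in B).  Python's `text.find(ch, i)`, `text.find('*/', i)` and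
-- `text.rfind('\n', 0, idx)` are ported by hand (exact for the 1- and 2-char needles
-- used here: first/last occurrence, none = -1).

-- text.find(c, i): first j ≥ i with cs[j] = c
def pvFindCharFrom (cs : List Char) (c : Char) (fuel i : Nat) : Option Nat :=
  match fuel with
  | 0 => none
  | f + 1 =>
    if i < cs.length then
      if cs.getD i ' ' = c then some i else pvFindCharFrom cs c f (i + 1)
    else none

-- text.find('*/', i): first j ≥ i with cs[j] = a and cs[j+1] = b
def pvFindPairFrom (cs : List Char) (a b : Char) (fuel i : Nat) : Option Nat :=
  match fuel with
  | 0 => none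
  | f + 1 =>
    if i + 1 < cs.length then
      if cs.getD i ' ' = a ∧ cs.getD (i + 1) ' ' = b then some i
      else pvFindPairFrom cs a b f (i + 1)
    else none

-- text.rfind('\n', 0, idx): last j < idx with cs[j] = '\n'
def pvRfindNlBefore (cs : List Char) (idx : Nat) : Option Nat :=
  match idx with
  | 0 => none
  | i + 1 => if cs.getD i ' ' = '\n' then some i else pvRfindNlBefore cs i

-- comment_mask[k] = True for k in range(a, b)
def pvMaskSet (m : List Bool) (a b : Nat) : List Bool :=
  m.mapIdx (fun k v => if a ≤ k ∧ k < b then true else v)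

-- step 3 of A (and of B): the block/line comment mask
def pvBuildMask (cs : List Char) (fuel : Nat) (m : List Bool) (i : Nat) : List Bool :=
  match fuel with
  | 0 => m
  | f + 1 =>
    if i < cs.length then
      if i + 1 < cs.length ∧ cs.getD i ' ' = '/' ∧ cs.getD (i + 1) ' ' = '*' then
        let e : Nat := match pvFindPairFrom cs '*' '/' cs.length (i + 2) with
          | some j => j + 2
          | none => cs.length
        pvBuildMask cs f (pvMaskSet m i e) e
      else if i + 1 < cs.length ∧ cs.getD i ' ' = '-' ∧ cs.getD (i + 1) ' ' = '-' then
        let e : Nat := match pvFindCharFrom cs '\n' cs.length (i + 2) with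
          | some j => j
          | none => cs.length
        pvBuildMask cs f (pvMaskSet m i e) e
      else pvBuildMask cs f m (i + 1)
    else m

-- step 2 of A: while i >= 0 and text[i].isspace(): i -= 1   (none = fell off the left end)
def pvDescendWs (cs : List Char) (fuel : Nat) (i : Int) : Option Nat :=
  match fuel with
  | 0 => none
  | f + 1 =>
    if 0 ≤ i then
      if PySem.Chars.isspace (cs.getD i.toNat ' ') then pvDescendWs cs f (i - 1)
      else some i.toNat
    else none

-- A's is_real_slash: the cursor line, stripped, is exactly "/"
def pvIsRealSlash (cs : List Char) (idx : Nat) : Bool :=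
  let ls : Nat := match pvRfindNlBefore cs idx with
    | some j => j + 1
    | none => 0
  let le : Nat := match pvFindCharFrom cs '\n' cs.length idx with
    | some j => j
    | none => cs.length
  PySem.Chars.strip ((cs.drop ls).take (le - ls)) = ['/']

-- A's separator test (used at steps 4 and 5)
def pvSepA (cs : List Char) (mask : List Bool) (idx : Nat) : Bool :=
  !(mask.getD idx false) &&
    (cs.getD idx ' ' = ';' || (cs.getD idx ' ' = '/' && pvIsRealSlash cs idx))

-- step 4 of A: while start > 0: if sep(start-1): break; start -= 1
def pvStartLoop (cs : List Char) (mask : List Bool) (fuel : Nat) (s : Int) : Int :=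
  match fuel with
  | 0 => s
  | f + 1 =>
    if 0 < s then
      if pvSepA cs mask (s - 1).toNat then s else pvStartLoop cs mask f (s - 1)
    else s

-- step 5 of A: while end < n: if sep(end): break; end += 1
def pvEndLoop (cs : List Char) (mask : List Bool) (fuel : Nat) (e : Nat) : Nat :=
  match fuel with
  | 0 => e
  | f + 1 =>
    if e < cs.length then
      if pvSepA cs mask e then e else pvEndLoop cs mask f (e + 1)
    else e

def pvIsTrim (c : Char) : Bool :=
  c = ' ' || c = '\t' || c = '\r' || c = '\n' || c = ';' || c = '/'

-- step 6 of A, left scan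
def pvTrimLeft (raw : List Char) (fuel l : Nat) : Nat :=
  match fuel with
  | 0 => l
  | f + 1 =>
    if l < raw.length then
      if pvIsTrim (raw.getD l ' ') then pvTrimLeft raw f (l + 1) else l
    else l

-- step 6 of A, right scan (structural on r itself)
def pvTrimRight (raw : List Char) (l r : Nat) : Nat :=
  match r with
  | 0 => 0
  | rr + 1 =>
    if l < rr + 1 then
      if pvIsTrim (raw.getD rr ' ') then pvTrimRight raw l rr else rr + 1
    else rr + 1

def extract_sql_under_cursor (p_testo : String) (p_cursor_pos : Int) : String × Int × Int :=
  let cs := p_testo.toList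
  let n := cs.length
  let p1 : Int := if (n : Int) < p_cursor_pos then (n : Int) else p_cursor_pos
  let p2 : Int := if p1 < 0 then 0 else p1
  let posOpt : Option Nat :=
    if p2 = (n : Int) ∨ PySem.Chars.isspace (cs.getD p2.toNat ' ') then
      pvDescendWs cs (n + 1) (if p2 = (n : Int) then (n : Int) - 1 else p2)
    else some p2.toNat
  match posOpt with
  | none => ("", 0, 0)
  | some pos =>
    let mask := pvBuildMask cs n (List.replicate n false) 0
    let start0 : Int := if pvSepA cs mask pos then (pos : Int) - 1 else (pos : Int)
    let start : Int := pvStartLoop cs mask (n + 1) start0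
    let eend : Nat := pvEndLoop cs mask n (pos + 1)
    let raw : List Char := PySem.List.slice cs (some start) (some (eend : Int))
    let left := pvTrimLeft raw (raw.length + 1) 0
    let right := pvTrimRight raw left raw.length
    (String.ofList ((raw.drop left).take (right - left)), start + left, start + right)

-- ===== PORT B =====
-- hand-written bisect_left of Source B
def pvBisect (a : List Nat) (x : Int) (fuel lo hi : Nat) : Nat :=
  match fuel with
  | 0 => lo
  | f + 1 =>
    if lo < hi then
      let mid := (lo + hi) / 2
      if (a.getD mid 0 : Int) < x then pvBisect a x f (mid + 1) hi else pvBisect a x f lo mid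
    else lo

-- one pass over the lines, collecting every real separator position in order
def pvCollectSeps (cs : List Char) (mask : List Bool) (fuel cur : Nat) : List Nat :=
  match fuel with
  | 0 => []
  | f + 1 =>
    if cur < cs.length then
      let e : Nat := match pvFindCharFrom cs '\n' cs.length cur with
        | some j => j
        | none => cs.length
      let flag := PySem.Chars.strip ((cs.drop cur).take (e - cur)) = ['/']
      ((List.range' cur (e - cur)).filter (fun k =>
          !(mask.getD k false) &&
            (cs.getD k ' ' = ';' || (cs.getD k ' ' = '/' && flag))))
        ++ pvCollectSeps cs mask f (e + 1)
    else []

def extract_sql_under_cursor_alt (p_testo : String) (p_cursor_pos : Int) : String × Int × Int :=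
  let cs := p_testo.toList
  let n := cs.length
  let p1 : Int := if (n : Int) < p_cursor_pos then (n : Int) else p_cursor_pos
  let p : Int := if p1 < 0 then 0 else p1
  let posOpt : Option Nat :=
    if p = (n : Int) ∨ PySem.Chars.isspace (cs.getD p.toNat ' ') then
      -- text[: n if p == n else p+1].rstrip()
      let t := PySem.Chars.rstrip (cs.take (if p = (n : Int) then n else p.toNat + 1))
      if t = [] then none else some (t.length - 1)
    else some p.toNat
  match posOpt with
  | none => ("", 0, 0)
  | some pos =>
    let mask := pvBuildMask cs n (List.replicate n false) 0
    let seps := pvCollectSeps cs mask (n + 1) 0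
    let j := pvBisect seps (pos : Int) seps.length 0 seps.length
    let init : Int := if j < seps.length ∧ seps.getD j 0 = pos then (pos : Int) - 1 else (pos : Int)
    let k := pvBisect seps init seps.length 0 seps.length
    let start : Nat := if 0 < k then seps.getD (k - 1) 0 + 1 else 0
    let m := pvBisect seps ((pos : Int) + 1) seps.length 0 seps.length
    let eend : Nat := if m < seps.length then seps.getD m 0 else n
    let raw := (cs.drop start).take (eend - start)
    let s1 := raw.dropWhile pvIsTrim                          -- raw.lstrip(TRIM)
    let left := raw.length - s1.length
    let stripped := (s1.reverse.dropWhile pvIsTrim).reverse   -- s1.rstrip(TRIM)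
    (String.ofList stripped, (start : Int) + left, (start : Int) + left + stripped.length)

-- ===== PRECONDITION & SPEC =====
-- When the effective cursor position is 0 and text[0] is itself a real separator, A sets
-- start = -1 and slices text[-1:end] (Python wraps the negative index), returning a
-- statement cut from the WRONG end of the text and offsets shifted to -1; B treats the
-- statement as starting at index 0, which is the intended reading.
def D_extract_sql_under_cursor (p_testo : String) (p_cursor_pos : Int) : Prop :=
  let cs := p_testo.toList
  let n := cs.length
  let p : Int := max 0 (min p_cursor_pos (n : Int))
  let i0 : Nat := if p = (n : Int) then n - 1 else p.toNat
  0 < n ∧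
  PySem.Chars.isspace (cs.getD 0 ' ') = false ∧
  ((cs.take (i0 + 1)).drop 1).all PySem.Chars.isspace = true ∧
  (cs.getD 0 ' ' = ';' ∨
    (cs.getD 0 ' ' = '/' ∧ PySem.Chars.strip (cs.takeWhile (· ≠ '\n')) = ['/']))
instance (p_testo : String) (p_cursor_pos : Int) : Decidable (D_extract_sql_under_cursor p_testo p_cursor_pos) := by
  unfold D_extract_sql_under_cursor; infer_instance

def Spec_extract_sql_under_cursor (p_testo : String) (p_cursor_pos : Int) (out : String × Int × Int) : Prop :=
  ¬ D_extract_sql_under_cursor p_testo p_cursor_pos → out = extract_sql_under_cursor_alt p_testo p_cursor_pos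
instance (p_testo : String) (p_cursor_pos : Int) (out : String × Int × Int) : Decidable (Spec_extract_sql_under_cursor p_testo p_cursor_pos out) := by
  unfold Spec_extract_sql_under_cursor; infer_instance

def pvDiffWitness_extract_sql_under_cursor : String × Int := (";a", 0)
def pvDiffWitnessOut_extract_sql_under_cursor : (String × Int × Int) × (String × Int × Int) :=
  (("a", -1, 0), ("a", 1, 2))

-- ===== CLAIM (what is proved, stated in full; the proofs are below) =====
def Claim_unchanged_extract_sql_under_cursor : Prop := ∀ (p_testo : String) (p_cursor_pos : Int), Dom_extract_sql_under_cursor p_testo p_cursor_pos → Spec_extract_sql_under_cursor p_testo p_cursor_pos (extract_sql_under_cursor p_testo p_cursor_pos)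
def Claim_changed_extract_sql_under_cursor : Prop := Dom_extract_sql_under_cursor (pvDiffWitness_extract_sql_under_cursor.1) (pvDiffWitness_extract_sql_under_cursor.2) ∧ D_extract_sql_under_cursor (pvDiffWitness_extract_sql_under_cursor.1) (pvDiffWitness_extract_sql_under_cursor.2) ∧ extract_sql_under_cursor (pvDiffWitness_extract_sql_under_cursor.1) (pvDiffWitness_extract_sql_under_cursor.2) = pvDiffWitnessOut_extract_sql_under_cursor.1 ∧ extract_sql_under_cursor_alt (pvDiffWitness_extract_sql_under_cursor.1) (pvDiffWitness_extract_sql_under_cursor.2) = pvDiffWitnessOut_extract_sql_under_cursor.2 ∧ pvDiffWitnessOut_extract_sql_under_cursor.1 ≠ pvDiffWitnessOut_extract_sql_under_cursor.2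

-- ===== LEMMAS AND PROOFS =====

-- ---------- find / rfind characterizations ----------

theorem pvFindCharFrom_some_iff (cs : List Char) (c : Char) :
    ∀ (f i j : Nat), cs.length ≤ f + i →
      (pvFindCharFrom cs c f i = some j ↔
        (i ≤ j ∧ j < cs.length ∧ cs.getD j ' ' = c ∧
          ∀ k, i ≤ k → k < j → cs.getD k ' ' ≠ c)) := by
  intro f
  induction f with
  | zero =>
    intro i j hf
    simp only [pvFindCharFrom]
    constructor
    · intro h; simp at h
    · intro ⟨h1, h2, _⟩; omega
  | succ f ih =>
    intro i j hf
    simp only [pvFindCharFrom]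
    split
    · rename_i hi
      split
      · rename_i hc
        constructor
        · intro h
          obtain rfl : i = j := by simpa using h
          exact ⟨le_refl _, hi, hc, by omega⟩
        · intro ⟨h1, h2, h3, h4⟩
          by_cases hij : i = j
          · simp [hij]
          · exact absurd hc (h4 i (le_refl _) (by omega))
      · rename_i hc
        rw [ih (i+1) j (by omega)]
        constructor
        · intro ⟨h1, h2, h3, h4⟩
          exact ⟨by omega, h2, h3, fun k hk1 hk2 => by
            by_cases hk : k = i
            · subst hk; exact hc
            · exact h4 k (by omega) hk2⟩
        · intro ⟨h1, h2, h3, h4⟩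
          refine ⟨by
            rcases Nat.lt_or_ge i j with h | h
            · omega
            · obtain rfl : i = j := by omega
              exact absurd h3 hc, h2, h3, fun k hk1 hk2 => h4 k (by omega) hk2⟩
    · rename_i hi
      constructor
      · intro h; simp at h
      · intro ⟨h1, h2, _⟩; omega

theorem pvFindCharFrom_none_iff (cs : List Char) (c : Char) :
    ∀ (f i : Nat), cs.length ≤ f + i →
      (pvFindCharFrom cs c f i = none ↔
        ∀ k, i ≤ k → k < cs.length → cs.getD k ' ' ≠ c) := by
  intro f
  induction f with
  | zero =>
    intro i hf
    simp only [pvFindCharFrom]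
    constructor
    · intro _ k hk1 hk2; omega
    · intro _; simp
  | succ f ih =>
    intro i hf
    simp only [pvFindCharFrom]
    split
    · rename_i hi
      split
      · rename_i hc
        constructor
        · intro h; simp at h
        · intro h; exact absurd hc (h i (le_refl _) hi)
      · rename_i hc
        rw [ih (i+1) (by omega)]
        constructor
        · intro h k hk1 hk2
          by_cases hk : k = i
          · subst hk; exact hc
          · exact h k (by omega) hk2
        · intro h k hk1 hk2; exact h k (by omega) hk2
    · rename_i hi
      constructor
      · intro _ k hk1 hk2; omega
      · intro _; simp

theorem pvRfindNlBefore_some_iff (cs : List Char) :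
    ∀ (idx j : Nat),
      (pvRfindNlBefore cs idx = some j ↔
        (j < idx ∧ cs.getD j ' ' = '\n' ∧ ∀ k, j < k → k < idx → cs.getD k ' ' ≠ '\n')) := by
  intro idx
  induction idx with
  | zero => intro j; simp [pvRfindNlBefore]
  | succ i ih =>
    intro j
    simp only [pvRfindNlBefore]
    split
    · rename_i hc
      constructor
      · intro h
        obtain rfl : i = j := by simpa using h
        exact ⟨by omega, hc, by omega⟩
      · intro ⟨h1, h2, h3⟩
        by_cases hij : j = i
        · simp [hij]
        · exact absurd hc (h3 i (by omega) (by omega))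
    · rename_i hc
      rw [ih j]
      constructor
      · intro ⟨h1, h2, h3⟩
        exact ⟨by omega, h2, fun k hk1 hk2 => by
          by_cases hk : k = i
          · subst hk; exact hc
          · exact h3 k hk1 (by omega)⟩
      · intro ⟨h1, h2, h3⟩
        refine ⟨by
          rcases Nat.lt_or_ge j i with h | h
          · exact h
          · obtain rfl : j = i := by omega
            exact absurd h2 hc, h2, fun k hk1 hk2 => h3 k hk1 (by omega)⟩

theorem pvRfindNlBefore_none_iff (cs : List Char) :
    ∀ (idx : Nat),
      (pvRfindNlBefore cs idx = none ↔ ∀ k, k < idx → cs.getD k ' ' ≠ '\n') := by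
  intro idx
  induction idx with
  | zero => simp [pvRfindNlBefore]
  | succ i ih =>
    simp only [pvRfindNlBefore]
    split
    · rename_i hc
      constructor
      · intro h; simp at h
      · intro h; exact absurd hc (h i (by omega))
    · rename_i hc
      rw [ih]
      constructor
      · intro h k hk1
        by_cases hk : k = i
        · subst hk; exact hc
        · exact h k (by omega)
      · intro h k hk1; exact h k (by omega)


-- ---------- step 2: A's whitespace descent = B's rstrip ----------

theorem pvRstrip_append (l : List Char) (c : Char) :
    PySem.Chars.rstrip (l ++ [c]) =
      if PySem.Chars.isspace c then PySem.Chars.rstrip l else l ++ [c] := by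
  by_cases hc : PySem.Chars.isspace c
  · simp [PySem.Chars.rstrip, List.dropWhile_cons, hc]
  · simp [PySem.Chars.rstrip, List.dropWhile_cons, hc]

theorem pvTake_succ_getD (cs : List Char) (i : Nat) (h : i < cs.length) :
    cs.take (i + 1) = cs.take i ++ [cs.getD i ' '] := by
  rw [List.getD_eq_getElem _ _ h, List.take_add_one, List.getElem?_eq_getElem h]
  rfl

theorem pvDescend_eq (cs : List Char) :
    ∀ (fuel : Nat) (i : Int), i < (cs.length : Int) → (i + 1).toNat < fuel →
      pvDescendWs cs fuel i =
        (if PySem.Chars.rstrip (cs.take (i + 1).toNat) = [] then none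
         else some ((PySem.Chars.rstrip (cs.take (i + 1).toNat)).length - 1)) := by
  intro fuel
  induction fuel with
  | zero => intro i hi hf; omega
  | succ f ih =>
    intro i hi hf
    simp only [pvDescendWs]
    split
    · rename_i h0
      have hilt : i.toNat < cs.length := by omega
      have h1 : (i + 1).toNat = i.toNat + 1 := by omega
      rw [h1, pvTake_succ_getD cs i.toNat hilt, pvRstrip_append]
      split
      · rename_i hsp
        have h2 : ((i - 1) + 1).toNat = i.toNat := by omega
        rw [ih (i - 1) (by omega) (by omega), h2]
      · rename_i hsp
        have hne : cs.take i.toNat ++ [cs.getD i.toNat ' '] ≠ [] := by simp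
        rw [if_neg hne]
        have hlen : (cs.take i.toNat ++ [cs.getD i.toNat ' ']).length = i.toNat + 1 := by
          simp; omega
        rw [hlen]
        simp
    · rename_i h0
      have h2 : (i + 1).toNat = 0 := by omega
      rw [h2]
      simp [PySem.Chars.rstrip]

theorem pvFindCharFrom_ge (cs : List Char) (c : Char) :
    ∀ (f i j : Nat), pvFindCharFrom cs c f i = some j → i ≤ j := by
  intro f
  induction f with
  | zero => intro i j h; simp [pvFindCharFrom] at h
  | succ f ih =>
    intro i j h
    simp only [pvFindCharFrom] at h
    split at h
    · split at h
      · obtain rfl : i = j := by simpa using h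
        exact le_refl _
      · exact Nat.le_of_succ_le (ih (i+1) j h)
    · simp at h

-- mask[0] is false unless the text starts with '/*' or '--'
-- ---------- the one-pass separator collection matches A's per-index tests ----------

-- inside the line [cur, e), A's is_real_slash computes exactly the line's slash-only flag
theorem pvIsRealSlash_line (cs : List Char) (cur idx : Nat)
    (hcur0 : cur = 0 ∨ (cur - 1 < cs.length ∧ cs.getD (cur - 1) ' ' = '\n'))
    (hci : cur ≤ idx)
    (hie : idx < (match pvFindCharFrom cs '\n' cs.length cur with
                  | some j => j
                  | none => cs.length)) :
    pvIsRealSlash cs idx =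
      decide (PySem.Chars.strip ((cs.drop cur).take
        ((match pvFindCharFrom cs '\n' cs.length cur with
          | some j => j
          | none => cs.length) - cur)) = ['/']) := by
  have hfuel : cs.length ≤ cs.length + cur := by omega
  have hfuel2 : cs.length ≤ cs.length + idx := by omega
  -- facts about the line end
  rcases hfc : pvFindCharFrom cs '\n' cs.length cur with _ | j
  all_goals simp only [hfc] at hie ⊢
  · -- no newline from cur on
    have hnone := (pvFindCharFrom_none_iff cs '\n' cs.length cur hfuel).mp hfc
    have hrf : pvRfindNlBefore cs idx = if cur = 0 then none else some (cur - 1) := by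
      by_cases hc0 : cur = 0
      · subst hc0
        rw [if_pos rfl]
        exact (pvRfindNlBefore_none_iff cs idx).mpr (fun k hk => by
          by_cases hkn : k < cs.length
          · exact hnone k (by omega) hkn
          · rw [List.getD_eq_getElem?_getD, List.getElem?_eq_none (by omega)]
            simp)
      · rw [if_neg hc0]
        rcases hcur0 with h | ⟨h1, h2⟩
        · omega
        · exact (pvRfindNlBefore_some_iff cs idx (cur - 1)).mpr
            ⟨by omega, h2, fun k hk1 hk2 => by
              by_cases hkn : k < cs.length
              · exact hnone k (by omega) hkn
              · rw [List.getD_eq_getElem?_getD, List.getElem?_eq_none (by omega)]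
                simp⟩
    have hff : pvFindCharFrom cs '\n' cs.length idx = none :=
      (pvFindCharFrom_none_iff cs '\n' cs.length idx hfuel2).mpr
        (fun k hk1 hk2 => hnone k (by omega) hk2)
    simp only [pvIsRealSlash, hrf, hff]
    by_cases hc0 : cur = 0
    · simp [hc0]
    · rw [if_neg hc0]
      have h1 : cur - 1 + 1 = cur := by omega
      simp [h1]
  · -- first newline from cur is at j
    obtain ⟨hj1, hj2, hj3, hj4⟩ := (pvFindCharFrom_some_iff cs '\n' cs.length cur j hfuel).mp hfc
    have hrf : pvRfindNlBefore cs idx = if cur = 0 then none else some (cur - 1) := by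
      by_cases hc0 : cur = 0
      · subst hc0
        rw [if_pos rfl]
        exact (pvRfindNlBefore_none_iff cs idx).mpr (fun k hk => hj4 k (by omega) (by omega))
      · rw [if_neg hc0]
        rcases hcur0 with h | ⟨h1, h2⟩
        · omega
        · exact (pvRfindNlBefore_some_iff cs idx (cur - 1)).mpr
            ⟨by omega, h2, fun k hk1 hk2 => hj4 k (by omega) (by omega)⟩
    have hff : pvFindCharFrom cs '\n' cs.length idx = some j :=
      (pvFindCharFrom_some_iff cs '\n' cs.length idx j hfuel2).mpr
        ⟨by omega, hj2, hj3, fun k hk1 hk2 => hj4 k (by omega) hk2⟩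
    simp only [pvIsRealSlash, hrf, hff]
    by_cases hc0 : cur = 0
    · simp [hc0]
    · rw [if_neg hc0]
      have h1 : cur - 1 + 1 = cur := by omega
      simp [h1]

theorem pvCollect_lb (cs : List Char) (mask : List Bool) :
    ∀ (fuel cur i : Nat), i ∈ pvCollectSeps cs mask fuel cur → cur ≤ i := by
  intro fuel
  induction fuel with
  | zero => intro cur i h; simp [pvCollectSeps] at h
  | succ f ih =>
    intro cur i h
    simp only [pvCollectSeps] at h
    split at h
    · rename_i hcur
      rw [List.mem_append] at h
      rcases h with h | h
      · have := List.mem_range'_1.mp (List.mem_of_mem_filter h)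
        omega
      · have h2 := ih _ i h
        rcases hfc : pvFindCharFrom cs '\n' cs.length cur with _ | j
        · simp [hfc] at h2; omega
        · simp [hfc] at h2
          have := pvFindCharFrom_ge cs '\n' cs.length cur j hfc
          omega
    · simp at h

theorem pvCollect_spec (cs : List Char) (mask : List Bool) :
    ∀ (fuel cur : Nat), cs.length + 1 ≤ fuel + cur →
      (cur = 0 ∨ cs.length < cur ∨ (cur - 1 < cs.length ∧ cs.getD (cur - 1) ' ' = '\n')) →
      (∀ i, i ∈ pvCollectSeps cs mask fuel cur ↔
        (cur ≤ i ∧ i < cs.length ∧ pvSepA cs mask i = true))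
      ∧ List.Pairwise (· < ·) (pvCollectSeps cs mask fuel cur) := by
  intro fuel
  induction fuel with
  | zero =>
    intro cur hf hinv
    constructor
    · intro i
      simp only [pvCollectSeps, List.not_mem_nil, false_iff]
      intro ⟨h1, h2, _⟩; omega
    · simp [pvCollectSeps]
  | succ f ih =>
    intro cur hf hinv
    by_cases hcur : cur < cs.length
    · -- line [cur, e)
      have hle : cur ≤ (match pvFindCharFrom cs '\n' cs.length cur with
          | some j => j | none => cs.length) ∧
          (match pvFindCharFrom cs '\n' cs.length cur with
          | some j => j | none => cs.length) ≤ cs.length := by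
        rcases hfc : pvFindCharFrom cs '\n' cs.length cur with _ | j
        · simp [hfc]; omega
        · have h1 := pvFindCharFrom_ge cs '\n' cs.length cur j hfc
          have h2 := ((pvFindCharFrom_some_iff cs '\n' cs.length cur j (by omega)).mp hfc).2.1
          simp [hfc]; omega
      set e := (match pvFindCharFrom cs '\n' cs.length cur with
          | some j => j | none => cs.length) with he
      have hinv' : e + 1 = 0 ∨ cs.length < e + 1 ∨
          (e + 1 - 1 < cs.length ∧ cs.getD (e + 1 - 1) ' ' = '\n') := by
        by_cases hen : e < cs.length
        · right; right
          refine ⟨by omega, ?_⟩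
          simp only [Nat.add_sub_cancel]
          rcases hfc : pvFindCharFrom cs '\n' cs.length cur with _ | j
          · rw [he] at hen; simp [hfc] at hen
          · have := ((pvFindCharFrom_some_iff cs '\n' cs.length cur j (by omega)).mp hfc).2.2.1
            rw [he]; simpa [hfc] using this
        · right; left; omega
      obtain ⟨ihmem, ihsort⟩ := ih (e + 1) (by omega) hinv'
      have hpred : ∀ i, cur ≤ i → i < e →
          (!(mask.getD i false) && (cs.getD i ' ' = ';' ||
            (cs.getD i ' ' = '/' && decide (PySem.Chars.strip ((cs.drop cur).take (e - cur)) = ['/']))))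
          = pvSepA cs mask i := by
        intro i h1 h2
        have := pvIsRealSlash_line cs cur i (by
          rcases hinv with h | h | h
          · exact Or.inl h
          · omega
          · exact Or.inr h) h1 (by rw [← he]; omega)
        rw [pvSepA, this]
      constructor
      · intro i
        simp only [pvCollectSeps, ← he, if_pos hcur, List.mem_append, List.mem_filter,
          List.mem_range'_1]
        constructor
        · intro h
          rcases h with ⟨hr, hp⟩ | h
          · have h2 : i < e := by omega
            refine ⟨by omega, by omega, ?_⟩
            rw [← hpred i (by omega) h2]
            exact hp
          · have := (ihmem i).mp h
            exact ⟨by omega, this.2.1, this.2.2⟩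
        · intro ⟨h1, h2, h3⟩
          rcases Nat.lt_or_ge i e with hie | hie
          · left
            refine ⟨by omega, ?_⟩
            rw [hpred i h1 hie]
            exact h3
          · rcases Nat.eq_or_lt_of_le hie with heq | hie2
            · -- i = e < n: cs[e] = '\n', not a separator
              exfalso
              have hnl : cs.getD i ' ' = '\n' := by
                rcases hfc : pvFindCharFrom cs '\n' cs.length cur with _ | j
                · have hen : e = cs.length := by rw [he]; simp [hfc]
                  omega
                · have hej : e = j := by rw [he]; simp [hfc]
                  have := ((pvFindCharFrom_some_iff cs '\n' cs.length cur j (by omega)).mp hfc).2.2.1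
                  rw [← heq, hej]; exact this
              rw [pvSepA, hnl] at h3
              simp at h3
            · right
              exact (ihmem i).mpr ⟨by omega, h2, h3⟩
      · simp only [pvCollectSeps, ← he, if_pos hcur]
        rw [List.pairwise_append]
        refine ⟨List.Pairwise.filter _ List.pairwise_lt_range', ihsort, ?_⟩
        intro x hx y hy
        have hx2 := List.mem_range'_1.mp (List.mem_of_mem_filter hx)
        have hy2 := pvCollect_lb cs mask f (e + 1) y hy
        omega
    · constructor
      · intro i
        simp only [pvCollectSeps, if_neg hcur, List.not_mem_nil, false_iff]
        intro ⟨h1, h2, _⟩; omega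
      · simp [pvCollectSeps, if_neg hcur]

-- ---------- binary search: spec on a sorted list ----------

theorem pvSortedMono (a : List Nat) (h : a.Pairwise (· < ·)) :
    ∀ i j, i ≤ j → j < a.length → a.getD i 0 ≤ a.getD j 0 := by
  intro i j hij hj
  rcases Nat.eq_or_lt_of_le hij with rfl | hlt
  · exact le_refl _
  · rw [List.getD_eq_getElem _ _ (by omega), List.getD_eq_getElem _ _ hj]
    exact le_of_lt (List.pairwise_iff_getElem.mp h i j (by omega) hj hlt)

theorem pvBisect_spec (a : List Nat) (x : Int)
    (mono : ∀ i j, i ≤ j → j < a.length → a.getD i 0 ≤ a.getD j 0) :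
    ∀ (fuel lo hi : Nat), hi - lo ≤ fuel → lo ≤ hi → hi ≤ a.length →
      lo ≤ pvBisect a x fuel lo hi ∧ pvBisect a x fuel lo hi ≤ hi ∧
      (∀ t, lo ≤ t → t < pvBisect a x fuel lo hi → (a.getD t 0 : Int) < x) ∧
      (∀ t, pvBisect a x fuel lo hi ≤ t → t < hi → ¬ ((a.getD t 0 : Int) < x)) := by
  intro fuel
  induction fuel with
  | zero =>
    intro lo hi hf hlh hha
    have : lo = hi := by omega
    subst this
    simp only [pvBisect]
    exact ⟨le_refl _, le_refl _, fun t h1 h2 => by omega, fun t h1 h2 => by omega⟩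
  | succ f ih =>
    intro lo hi hf hlh hha
    simp only [pvBisect]
    split
    · rename_i hlo
      split
      · rename_i hx
        obtain ⟨r1, r2, r3, r4⟩ := ih ((lo + hi) / 2 + 1) hi (by omega) (by omega) hha
        refine ⟨by omega, r2, ?_, r4⟩
        intro t h1 h2
        by_cases ht : t ≤ (lo + hi) / 2
        · have hcast : ((a.getD t 0 : Nat) : Int) ≤ ((a.getD ((lo + hi) / 2) 0 : Nat) : Int) := by
            exact_mod_cast mono t ((lo + hi) / 2) ht (by omega)
          exact lt_of_le_of_lt hcast hx
        · exact r3 t (by omega) h2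
      · rename_i hx
        obtain ⟨r1, r2, r3, r4⟩ := ih lo ((lo + hi) / 2) (by omega) (by omega) (by omega)
        refine ⟨r1, by omega, r3, ?_⟩
        intro t h1 h2
        by_cases ht : t < (lo + hi) / 2
        · exact r4 t h1 ht
        · intro hlt
          apply hx
          have hcast : ((a.getD ((lo + hi) / 2) 0 : Nat) : Int) ≤ ((a.getD t 0 : Nat) : Int) := by
            exact_mod_cast mono ((lo + hi) / 2) t (by omega) (by omega)
          exact lt_of_le_of_lt hcast hlt
    · rename_i hlo
      exact ⟨le_refl _, by omega, fun t h1 h2 => by omega, fun t h1 h2 => by omega⟩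

theorem pvBisectMem (a : List Nat) (hsort : a.Pairwise (· < ·)) (x : Nat) :
    (x ∈ a) ↔ (pvBisect a (x : Int) a.length 0 a.length < a.length ∧
      a.getD (pvBisect a (x : Int) a.length 0 a.length) 0 = x) := by
  have mono := pvSortedMono a hsort
  obtain ⟨r1, r2, r3, r4⟩ := pvBisect_spec a (x : Int) mono a.length 0 a.length
    (by omega) (by omega) (le_refl _)
  constructor
  · intro hx
    obtain ⟨t, ht, hte⟩ := List.mem_iff_getElem.mp hx
    have htd : a.getD t 0 = x := by rw [List.getD_eq_getElem _ _ ht]; exact hte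
    have hjt : pvBisect a (x : Int) a.length 0 a.length ≤ t := by
      by_contra hc
      have := r3 t (by omega) (by omega)
      rw [htd] at this
      omega
    refine ⟨by omega, ?_⟩
    have h1 : a.getD (pvBisect a (x : Int) a.length 0 a.length) 0 ≤ a.getD t 0 :=
      mono _ t hjt ht
    have h2 := r4 (pvBisect a (x : Int) a.length 0 a.length) (le_refl _) (by omega)
    omega
  · intro ⟨h1, h2⟩
    rw [← h2, List.getD_eq_getElem _ _ h1]
    exact List.getElem_mem h1

-- ---------- A's two scan loops ----------

theorem pvStartLoop_spec (cs : List Char) (mask : List Bool) :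
    ∀ (fuel : Nat) (s : Int), 0 ≤ s → s.toNat < fuel →
      0 ≤ pvStartLoop cs mask fuel s ∧ pvStartLoop cs mask fuel s ≤ s ∧
      (0 < pvStartLoop cs mask fuel s →
        pvSepA cs mask (pvStartLoop cs mask fuel s - 1).toNat = true) ∧
      (∀ t : Nat, pvStartLoop cs mask fuel s ≤ (t : Int) → (t : Int) < s →
        pvSepA cs mask t = false) := by
  intro fuel
  induction fuel with
  | zero => intro s h0 hf; omega
  | succ f ih =>
    intro s h0 hf
    simp only [pvStartLoop]
    split
    · rename_i hs
      split
      · rename_i hsep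
        exact ⟨by omega, le_refl _, fun _ => hsep, fun t h1 h2 => by omega⟩
      · rename_i hsep
        obtain ⟨r1, r2, r3, r4⟩ := ih (s - 1) (by omega) (by omega)
        refine ⟨r1, by omega, r3, ?_⟩
        intro t h1 h2
        by_cases ht : (t : Int) < s - 1
        · exact r4 t h1 ht
        · have : (t : Int) = s - 1 := by omega
          have ht2 : t = (s - 1).toNat := by omega
          rw [ht2]
          simpa using hsep
    · exact ⟨by omega, le_refl _, fun h => by omega, fun t h1 h2 => by omega⟩

theorem pvEndLoop_spec (cs : List Char) (mask : List Bool) :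
    ∀ (fuel e : Nat), cs.length ≤ fuel + e → e ≤ cs.length →
      e ≤ pvEndLoop cs mask fuel e ∧ pvEndLoop cs mask fuel e ≤ cs.length ∧
      (pvEndLoop cs mask fuel e < cs.length →
        pvSepA cs mask (pvEndLoop cs mask fuel e) = true) ∧
      (∀ t, e ≤ t → t < pvEndLoop cs mask fuel e → pvSepA cs mask t = false) := by
  intro fuel
  induction fuel with
  | zero =>
    intro e hf he
    have : e = cs.length := by omega
    simp only [pvEndLoop]
    exact ⟨le_refl _, by omega, fun h => by omega, fun t h1 h2 => by omega⟩
  | succ f ih =>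
    intro e hf he
    simp only [pvEndLoop]
    split
    · rename_i hen
      split
      · rename_i hsep
        exact ⟨le_refl _, by omega, fun _ => hsep, fun t h1 h2 => by omega⟩
      · rename_i hsep
        obtain ⟨r1, r2, r3, r4⟩ := ih (e + 1) (by omega) (by omega)
        refine ⟨by omega, r2, r3, ?_⟩
        intro t h1 h2
        by_cases ht : t = e
        · subst ht; simpa using hsep
        · exact r4 t (by omega) h2
    · rename_i hen
      exact ⟨le_refl _, by omega, fun h => by omega, fun t h1 h2 => by omega⟩

-- ---------- step 6: A's trim loops = B's lstrip/rstrip ----------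

theorem pvTrimLeft_eq (raw : List Char) :
    ∀ (fuel l : Nat), raw.length ≤ fuel + l →
      pvTrimLeft raw fuel l = l + ((raw.drop l).takeWhile pvIsTrim).length := by
  intro fuel
  induction fuel with
  | zero =>
    intro l hf
    rw [List.drop_eq_nil_of_le (by omega)]
    simp [pvTrimLeft]
  | succ f ih =>
    intro l hf
    simp only [pvTrimLeft]
    split
    · rename_i hl
      rw [List.drop_eq_getElem_cons hl, List.takeWhile_cons]
      rw [← List.getD_eq_getElem raw ' ' hl]
      split
      · rw [ih (l + 1) (by omega)]
        simp; omega
      · simp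
    · rename_i hl
      rw [List.drop_eq_nil_of_le (by omega)]
      simp

theorem pvTrimRight_eq (raw : List Char) :
    ∀ (r l : Nat), l ≤ r → r ≤ raw.length →
      pvTrimRight raw l r =
        l + (((raw.drop l).take (r - l)).reverse.dropWhile pvIsTrim).length := by
  intro r
  induction r with
  | zero =>
    intro l h1 h2
    have : l = 0 := by omega
    subst this
    simp [pvTrimRight]
  | succ rr ih =>
    intro l h1 h2
    simp only [pvTrimRight]
    split
    · rename_i hl
      have hrr : rr < raw.length := by omega
      have hdl : rr - l < (raw.drop l).length := by simp; omega
      have hsplit : (raw.drop l).take (rr + 1 - l) =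
          (raw.drop l).take (rr - l) ++ [raw.getD rr ' '] := by
        have h3 : rr + 1 - l = (rr - l) + 1 := by omega
        rw [h3, pvTake_succ_getD _ _ hdl]
        congr 2
        rw [List.getD_eq_getElem _ _ hdl, List.getElem_drop, List.getD_eq_getElem _ _ (by omega)]
        congr 1; omega
      rw [hsplit, List.reverse_append]
      simp only [List.reverse_cons, List.reverse_nil, List.nil_append, List.cons_append,
        List.dropWhile_cons]
      split
      · exact ih l (by omega) (by omega)
      · have hlen : ((raw.drop l).take (rr - l)).length = rr - l := by simp; omega
        simp [hlen]; omega
    · rename_i hl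
      have : l = rr + 1 := by omega
      subst this
      simp

-- ---------- rstrip structure (for the effective-position analysis) ----------

theorem pvRstrip_prefix (l : List Char) : PySem.Chars.rstrip l <+: l := by
  have h := List.dropWhile_suffix (l := l.reverse) PySem.Chars.isspace
  have h2 := List.reverse_prefix.mpr h
  rw [List.reverse_reverse] at h2
  exact h2

theorem pvRstrip_last (l : List Char) (h : PySem.Chars.rstrip l ≠ []) :
    PySem.Chars.isspace
      ((PySem.Chars.rstrip l).getD ((PySem.Chars.rstrip l).length - 1) ' ') = false := by
  have hd : l.reverse.dropWhile PySem.Chars.isspace ≠ [] := by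
    intro hc
    apply h
    simp [PySem.Chars.rstrip, hc]
  obtain ⟨c, rest, hcr⟩ := List.exists_cons_of_ne_nil hd
  have hhead : PySem.Chars.isspace c = false := by
    have h5 := List.head_dropWhile_not PySem.Chars.isspace hd
    simp only [hcr, List.head_cons] at h5
    exact h5
  show PySem.Chars.isspace ((PySem.Chars.rstrip l).getD _ ' ') = false
  simp only [PySem.Chars.rstrip, hcr, List.reverse_cons, List.length_append,
    List.length_reverse]
  rw [List.getD_eq_getElem _ _ (by simp)]
  rw [List.getElem_append_right (by simp)]
  simpa using hhead

theorem pvRstrip_split (l : List Char) :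
    l = PySem.Chars.rstrip l ++ (l.reverse.takeWhile PySem.Chars.isspace).reverse ∧
    (l.reverse.takeWhile PySem.Chars.isspace).reverse.all PySem.Chars.isspace = true := by
  constructor
  · conv_lhs => rw [← List.reverse_reverse l, ← List.takeWhile_append_dropWhile
      (p := PySem.Chars.isspace) (l := l.reverse)]
    rw [List.reverse_append]
    rfl
  · rw [List.all_eq_true]
    intro x hx
    rw [List.mem_reverse] at hx
    exact List.mem_takeWhile_imp hx

theorem pvRstrip_len_le (l : List Char) : (PySem.Chars.rstrip l).length ≤ l.length :=
  List.IsPrefix.length_le (pvRstrip_prefix l)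

-- cs.take (first newline position) is cs.takeWhile (≠ '\n')
theorem pvTakeWhile_eq_take (cs : List Char) :
    ∀ (j : Nat), j ≤ cs.length → (∀ k, k < j → cs.getD k ' ' ≠ '\n') →
      (j < cs.length → cs.getD j ' ' = '\n') →
      cs.takeWhile (fun ch => ch ≠ '\n') = cs.take j := by
  induction cs with
  | nil => intro j h1 _ _; simp
  | cons c tl ih =>
    intro j h1 h2 h3
    cases j with
    | zero =>
      have hc : c = '\n' := by simpa using h3 (by simp)
      simp [List.takeWhile_cons, hc]
    | succ j' =>
      have hc : c ≠ '\n' := by simpa using h2 0 (by omega)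
      rw [List.take_succ_cons, List.takeWhile_cons,
        ih j' (by simpa using h1) (fun k hk => by simpa using h2 (k + 1) (by omega))
          (fun hk => by simpa using h3 (by simpa using hk))]
      simp [hc]

-- a separator at index 0 gives D's fourth conjunct
theorem pvSep0_D (cs : List Char) (mask : List Bool)
    (h : pvSepA cs mask 0 = true) :
    cs.getD 0 ' ' = ';' ∨ (cs.getD 0 ' ' = '/' ∧
      PySem.Chars.strip (cs.takeWhile (fun ch => ch ≠ '\n')) = ['/']) := by
  rw [pvSepA] at h
  simp only [Bool.and_eq_true, Bool.or_eq_true] at h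
  rcases h.2 with h2 | h2
  · left; simpa using h2
  · right
    refine ⟨by simpa using h2.1, ?_⟩
    have hrs := h2.2
    rw [pvIsRealSlash] at hrs
    have hrf : pvRfindNlBefore cs 0 = none := rfl
    simp only [hrf] at hrs
    rcases hfc : pvFindCharFrom cs '\n' cs.length 0 with _ | j
    · simp only [hfc] at hrs
      have hnone := (pvFindCharFrom_none_iff cs '\n' cs.length 0 (by omega)).mp hfc
      rw [pvTakeWhile_eq_take cs cs.length (le_refl _)
        (fun k hk => hnone k (by omega) hk) (fun hk => by omega)]
      simpa using hrs
    · simp only [hfc] at hrs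
      obtain ⟨hj1, hj2, hj3, hj4⟩ := (pvFindCharFrom_some_iff cs '\n' cs.length 0 j (by omega)).mp hfc
      rw [pvTakeWhile_eq_take cs j (by omega) (fun k hk => hj4 k (by omega) hk) (fun _ => hj3)]
      simpa using hrs

-- ---------- the effective position: bounds and the pos = 0 analysis ----------

theorem pvPos_facts (cs : List Char) (p : Int) (hp0 : 0 ≤ p) (hpn : p ≤ (cs.length : Int))
    (pos : Nat)
    (h : (if p = (cs.length : Int) ∨ PySem.Chars.isspace (cs.getD p.toNat ' ') then
            (let t := PySem.Chars.rstrip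
              (cs.take (if p = (cs.length : Int) then cs.length else p.toNat + 1));
             if t = [] then none else some (t.length - 1))
          else some p.toNat) = some pos) :
    pos < cs.length ∧
    (pos = 0 → (0 < cs.length ∧ PySem.Chars.isspace (cs.getD 0 ' ') = false ∧
      ((cs.take ((if p = (cs.length : Int) then cs.length - 1 else p.toNat) + 1)).drop 1).all
        PySem.Chars.isspace = true)) := by
  by_cases hcond : p = (cs.length : Int) ∨ PySem.Chars.isspace (cs.getD p.toNat ' ')
  · rw [if_pos hcond] at h
    simp only [] at h
    set m := (if p = (cs.length : Int) then cs.length else p.toNat + 1) with hm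
    have hmn : m ≤ cs.length := by rw [hm]; split_ifs <;> omega
    by_cases htn : PySem.Chars.rstrip (cs.take m) = []
    · rw [if_pos htn] at h; simp at h
    · rw [if_neg htn] at h
      set t := PySem.Chars.rstrip (cs.take m) with ht
      have hposv : pos = t.length - 1 := by
        have := Option.some.inj h
        omega
      have htl : 1 ≤ t.length := List.length_pos_of_ne_nil htn
      have htle : t.length ≤ m := by
        have h1 := pvRstrip_len_le (cs.take m)
        rw [← ht] at h1
        simpa using le_trans h1 (by simp)
      refine ⟨by omega, ?_⟩
      intro hp00
      have htlen1 : t.length = 1 := by omega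
      have hm1 : 1 ≤ m := by omega
      have hn1 : 0 < cs.length := by omega
      -- t = [cs.getD 0 ' ']
      have hpre := pvRstrip_prefix (cs.take m)
      rw [← ht] at hpre
      have hteq : t = cs.take 1 := by
        rw [List.prefix_iff_eq_take.mp hpre, htlen1, List.take_take]
        congr 1
        omega
      have ht0 : t = [cs.getD 0 ' '] := by
        rw [hteq]
        rcases cs with _ | ⟨c0, tl⟩
        · simp at hn1
        · simp [List.take_succ_cons]
      refine ⟨hn1, ?_, ?_⟩
      · have := pvRstrip_last (cs.take m) (by rw [← ht]; exact htn)
        rw [← ht, ht0] at this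
        simpa using this
      · have hsplit := pvRstrip_split (cs.take m)
        rw [← ht] at hsplit
        have hi0 : (if p = (cs.length : Int) then cs.length - 1 else p.toNat) + 1 = m := by
          rw [hm]; split_ifs <;> omega
        rw [hi0, hsplit.1, ht0]
        simpa using hsplit.2
  · rw [if_neg hcond] at h
    have hposv : pos = p.toNat := by
      have := Option.some.inj h
      omega
    push_neg at hcond
    obtain ⟨hne, hns⟩ := hcond
    have hplt : p < (cs.length : Int) := by omega
    refine ⟨by omega, ?_⟩
    intro hp00
    have hi0 : (if p = (cs.length : Int) then cs.length - 1 else p.toNat) + 1 = 1 := by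
      rw [if_neg hne]; omega
    refine ⟨by omega, ?_, ?_⟩
    · have : p.toNat = 0 := by omega
      rw [← this]
      simpa using hns
    · rw [hi0]
      have : (cs.take 1).drop 1 = [] := by
        rw [List.drop_eq_nil_of_le]
        simp
      rw [this]
      simp

-- ---------- the statement bounds and trimming agree ----------

theorem pvDropWhile_eq_drop (p : Char → Bool) (l : List Char) :
    l.drop ((l.takeWhile p).length) = l.dropWhile p := by
  induction l with
  | nil => simp
  | cons c tl ih =>
    by_cases hc : p c
    · simp [List.takeWhile_cons, List.dropWhile_cons, hc, ih]
    · simp [List.takeWhile_cons, List.dropWhile_cons, hc]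

theorem pvMainLemma (cs : List Char) (pos : Nat) (hpos : pos < cs.length)
    (hnd : ¬(pos = 0 ∧
      pvSepA cs (pvBuildMask cs cs.length (List.replicate cs.length false) 0) 0 = true)) :
    (let mask := pvBuildMask cs cs.length (List.replicate cs.length false) 0
     let start0 : Int := if pvSepA cs mask pos then (pos : Int) - 1 else (pos : Int)
     let start : Int := pvStartLoop cs mask (cs.length + 1) start0
     let eend : Nat := pvEndLoop cs mask cs.length (pos + 1)
     let raw : List Char := PySem.List.slice cs (some start) (some (eend : Int))
     let left := pvTrimLeft raw (raw.length + 1) 0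
     let right := pvTrimRight raw left raw.length
     (String.ofList ((raw.drop left).take (right - left)),
       start + (left : Int), start + (right : Int)))
    = (let mask := pvBuildMask cs cs.length (List.replicate cs.length false) 0
       let seps := pvCollectSeps cs mask (cs.length + 1) 0
       let j := pvBisect seps (pos : Int) seps.length 0 seps.length
       let init : Int := if j < seps.length ∧ seps.getD j 0 = pos then (pos : Int) - 1
                         else (pos : Int)
       let k := pvBisect seps init seps.length 0 seps.length
       let start : Nat := if 0 < k then seps.getD (k - 1) 0 + 1 else 0
       let m := pvBisect seps ((pos : Int) + 1) seps.length 0 seps.length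
       let eend : Nat := if m < seps.length then seps.getD m 0 else cs.length
       let raw := (cs.drop start).take (eend - start)
       let s1 := raw.dropWhile pvIsTrim
       let left := raw.length - s1.length
       let stripped := (s1.reverse.dropWhile pvIsTrim).reverse
       (String.ofList stripped, (start : Int) + (left : Int),
         (start : Int) + (left : Int) + (stripped.length : Int))) := by
  simp only []
  set mask := pvBuildMask cs cs.length (List.replicate cs.length false) 0 with hmaskd
  set seps := pvCollectSeps cs mask (cs.length + 1) 0 with hsepsd
  obtain ⟨hmem0, hsort⟩ := pvCollect_spec cs mask (cs.length + 1) 0 (by omega) (Or.inl rfl)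
  rw [← hsepsd] at hmem0 hsort
  have hmem : ∀ i, i ∈ seps ↔ (i < cs.length ∧ pvSepA cs mask i = true) := by
    intro i
    rw [hmem0 i]
    exact ⟨fun ⟨_, b, c⟩ => ⟨b, c⟩, fun ⟨b, c⟩ => ⟨by omega, b, c⟩⟩
  have mono := pvSortedMono seps hsort
  have helem : ∀ i, i < seps.length →
      seps.getD i 0 < cs.length ∧ pvSepA cs mask (seps.getD i 0) = true := by
    intro i hi
    have hgm : seps.getD i 0 ∈ seps := by
      rw [List.getD_eq_getElem _ _ hi]; exact List.getElem_mem hi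
    exact (hmem _).mp hgm
  -- the separator test at pos agrees
  have hj := pvBisectMem seps hsort pos
  set j := pvBisect seps (pos : Int) seps.length 0 seps.length with hjd
  have hcond_iff : (j < seps.length ∧ seps.getD j 0 = pos) ↔ pvSepA cs mask pos = true := by
    rw [← hj, hmem pos]
    exact ⟨fun h => h.2, fun h => ⟨hpos, h⟩⟩
  have hinit : (if j < seps.length ∧ seps.getD j 0 = pos then (pos : Int) - 1 else (pos : Int))
      = (if pvSepA cs mask pos then (pos : Int) - 1 else (pos : Int)) := by
    by_cases hc : pvSepA cs mask pos = true
    · rw [if_pos (hcond_iff.mpr hc), if_pos hc]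
    · rw [if_neg (fun hx => hc (hcond_iff.mp hx)), if_neg (by simpa using hc)]
  rw [hinit]
  set init : Int := if pvSepA cs mask pos then (pos : Int) - 1 else (pos : Int) with hinitd
  have hinit0 : 0 ≤ init := by
    rw [hinitd]
    by_cases hc : pvSepA cs mask pos = true
    · rw [if_pos hc]
      have hpz : pos ≠ 0 := by
        intro hz
        subst hz
        exact hnd ⟨rfl, hc⟩
      omega
    · rw [if_neg (by simpa using hc)]; omega
  have hinitle : init ≤ (pos : Int) := by
    rw [hinitd]; split_ifs <;> omega
  obtain ⟨a1, a2, a3, a4⟩ := pvStartLoop_spec cs mask (cs.length + 1) init hinit0 (by omega)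
  obtain ⟨b1, b2, b3, b4⟩ :=
    pvBisect_spec seps init mono seps.length 0 seps.length (by omega) (by omega) (le_refl _)
  set k := pvBisect seps init seps.length 0 seps.length with hkd
  set sA := pvStartLoop cs mask (cs.length + 1) init with hsAd
  have hidx : ∀ u : Nat, u < cs.length → pvSepA cs mask u = true →
      ∃ i, i < seps.length ∧ seps.getD i 0 = u := by
    intro u hu hsep
    have humem : u ∈ seps := (hmem u).mpr ⟨hu, hsep⟩
    obtain ⟨t, ht, hte⟩ := List.mem_iff_getElem.mp humem
    exact ⟨t, ht, by rw [List.getD_eq_getElem _ _ ht]; exact hte⟩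
  have hstart : sA = ((if 0 < k then seps.getD (k - 1) 0 + 1 else 0 : Nat) : Int) := by
    by_cases hk0 : 0 < k
    · rw [if_pos hk0]
      have ht0 := helem (k - 1) (by omega)
      have ht0init : ((seps.getD (k - 1) 0 : Nat) : Int) < init := b3 (k - 1) (by omega) (by omega)
      have h1 : ((seps.getD (k - 1) 0 : Nat) : Int) < sA := by
        by_contra hc
        have h4 := a4 (seps.getD (k - 1) 0) (by omega) ht0init
        rw [ht0.2] at h4
        simp at h4
      have h2 : sA ≤ ((seps.getD (k - 1) 0 : Nat) : Int) + 1 := by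
        by_contra hc
        push_neg at hc
        have hsApos : 0 < sA := by omega
        have hsep' := a3 hsApos
        have hun : (sA - 1).toNat < cs.length := by omega
        obtain ⟨iu, hiu1, hiu2⟩ := hidx (sA - 1).toNat hun hsep'
        have hiuk : iu < k := by
          by_contra hcc
          have h5 := b4 iu (by omega) hiu1
          rw [hiu2] at h5
          omega
        have h6 := mono iu (k - 1) (by omega) (by omega)
        rw [hiu2] at h6
        omega
      push_cast
      omega
    · rw [if_neg hk0]
      have hz : sA = 0 := by
        by_contra hc
        have hsApos : 0 < sA := by omega
        have hsep' := a3 hsApos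
        have hun : (sA - 1).toNat < cs.length := by omega
        obtain ⟨iu, hiu1, hiu2⟩ := hidx (sA - 1).toNat hun hsep'
        have h5 := b4 iu (by omega) hiu1
        rw [hiu2] at h5
        omega
      rw [hz]; simp
  -- the end bound agrees
  obtain ⟨e1, e2, e3, e4⟩ := pvEndLoop_spec cs mask cs.length (pos + 1) (by omega) (by omega)
  obtain ⟨c1, c2, c3, c4⟩ :=
    pvBisect_spec seps ((pos : Int) + 1) mono seps.length 0 seps.length
      (by omega) (by omega) (le_refl _)
  set m := pvBisect seps ((pos : Int) + 1) seps.length 0 seps.length with hmd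
  set eA := pvEndLoop cs mask cs.length (pos + 1) with heAd
  have hend : eA = (if m < seps.length then seps.getD m 0 else cs.length) := by
    by_cases hm : m < seps.length
    · rw [if_pos hm]
      have hv := helem m hm
      have hvge : (pos : Int) + 1 ≤ ((seps.getD m 0 : Nat) : Int) := by
        have := c4 m (le_refl _) hm
        omega
      have h1 : eA ≤ seps.getD m 0 := by
        by_contra hc
        have h4 := e4 (seps.getD m 0) (by omega) (by omega)
        rw [hv.2] at h4
        simp at h4
      have h2 : seps.getD m 0 ≤ eA := by
        by_contra hc
        push_neg at hc
        have heAn : eA < cs.length := by omega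
        have hsepe := e3 heAn
        obtain ⟨ie, hie1, hie2⟩ := hidx eA heAn hsepe
        have hie3 : m ≤ ie := by
          by_contra hcc
          have h5 := c3 ie (by omega) (by omega)
          rw [hie2] at h5
          omega
        have h6 := mono m ie hie3 hie1
        rw [hie2] at h6
        omega
      omega
    · rw [if_neg hm]
      have hmlen : m = seps.length := by omega
      by_contra hc
      have heAn : eA < cs.length := by omega
      have hsepe := e3 heAn
      obtain ⟨ie, hie1, hie2⟩ := hidx eA heAn hsepe
      have h5 := c3 ie (by omega) (by omega)
      rw [hie2] at h5
      omega
  -- the raw slices agree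
  have hraw : PySem.List.slice cs (some sA) (some ((eA : Nat) : Int)) =
      (cs.drop (if 0 < k then seps.getD (k - 1) 0 + 1 else 0)).take
        ((if m < seps.length then seps.getD m 0 else cs.length) -
          (if 0 < k then seps.getD (k - 1) 0 + 1 else 0)) := by
    rw [hstart, hend]
    exact PySem.List.slice_natCast cs _ _
  rw [hraw]
  set raw := (cs.drop (if 0 < k then seps.getD (k - 1) 0 + 1 else 0)).take
      ((if m < seps.length then seps.getD m 0 else cs.length) -
        (if 0 < k then seps.getD (k - 1) 0 + 1 else 0)) with hrawd
  -- trimming agrees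
  set s1 := raw.dropWhile pvIsTrim with hs1d
  set stp := (s1.reverse.dropWhile pvIsTrim).reverse with hstpd
  have hlen_tw := congrArg List.length (List.takeWhile_append_dropWhile (p := pvIsTrim) (l := raw))
  rw [List.length_append] at hlen_tw
  rw [← hs1d] at hlen_tw
  have hleft : pvTrimLeft raw (raw.length + 1) 0 = (raw.takeWhile pvIsTrim).length := by
    rw [pvTrimLeft_eq raw (raw.length + 1) 0 (by omega)]
    simp
  have hleftB : (raw.takeWhile pvIsTrim).length = raw.length - s1.length := by
    omega
  have hdrop : raw.drop ((raw.takeWhile pvIsTrim).length) = s1 := by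
    rw [hs1d, ← pvDropWhile_eq_drop pvIsTrim raw]
  have htwle : (raw.takeWhile pvIsTrim).length ≤ raw.length := by omega
  have hdrop2 : (raw.drop ((raw.takeWhile pvIsTrim).length)).take
      (raw.length - (raw.takeWhile pvIsTrim).length) = s1 := by
    rw [List.take_of_length_le (by simp), hdrop]
  have hright : pvTrimRight raw ((raw.takeWhile pvIsTrim).length) raw.length =
      (raw.takeWhile pvIsTrim).length + stp.length := by
    rw [pvTrimRight_eq raw raw.length ((raw.takeWhile pvIsTrim).length) htwle (le_refl _)]
    rw [hdrop2, hstpd]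
    simp
  have hs1split : s1 = stp ++ (s1.reverse.takeWhile pvIsTrim).reverse := by
    rw [hstpd]
    conv_lhs => rw [← List.reverse_reverse s1, ← List.takeWhile_append_dropWhile
      (p := pvIsTrim) (l := s1.reverse)]
    rw [List.reverse_append]
  have hstmt : (raw.drop ((raw.takeWhile pvIsTrim).length)).take stp.length = stp := by
    rw [hdrop]
    conv_lhs => rw [hs1split]
    exact List.take_left
  rw [hleft, hright]
  refine congrArg₂ Prod.mk ?_ (congrArg₂ Prod.mk ?_ ?_)
  · have harith : (raw.takeWhile pvIsTrim).length + stp.length -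
        (raw.takeWhile pvIsTrim).length = stp.length := by omega
    rw [harith, hstmt]
  · rw [hstart, hleftB]
  · rw [hstart, hleftB]
    push_cast
    ring

-- ===== VERDICT (by name: the statement is the Claim_ definition above) =====
theorem extract_sql_under_cursor_spec : Claim_unchanged_extract_sql_under_cursor := by
  intro s c hdom hndD
  show extract_sql_under_cursor s c = extract_sql_under_cursor_alt s c
  unfold extract_sql_under_cursor extract_sql_under_cursor_alt
  simp only []
  set cs := s.toList with hcs
  set p2 : Int := if (if ((cs.length : Nat) : Int) < c then ((cs.length : Nat) : Int) else c) < 0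
      then 0 else (if ((cs.length : Nat) : Int) < c then ((cs.length : Nat) : Int) else c)
    with hp2d
  have hp2b : 0 ≤ p2 ∧ p2 ≤ (cs.length : Int) := by rw [hp2d]; split_ifs <;> omega
  have hio1 : (if p2 = ((cs.length : Nat) : Int) then ((cs.length : Nat) : Int) - 1 else p2) <
      ((cs.length : Nat) : Int) := by split_ifs <;> omega
  have hio2 : ((if p2 = ((cs.length : Nat) : Int) then ((cs.length : Nat) : Int) - 1 else p2) + 1).toNat <
      cs.length + 1 := by split_ifs <;> omega
  have hio3 : ((if p2 = ((cs.length : Nat) : Int) then ((cs.length : Nat) : Int) - 1 else p2) + 1).toNat =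
      (if p2 = ((cs.length : Nat) : Int) then cs.length else p2.toNat + 1) := by
    split_ifs <;> omega
  have hbridge : pvDescendWs cs (cs.length + 1)
      (if p2 = ((cs.length : Nat) : Int) then ((cs.length : Nat) : Int) - 1 else p2) =
      (let t := PySem.Chars.rstrip
        (cs.take (if p2 = ((cs.length : Nat) : Int) then cs.length else p2.toNat + 1));
       if t = [] then none else some (t.length - 1)) := by
    rw [pvDescend_eq cs (cs.length + 1) _ hio1 hio2, hio3]
  rw [hbridge]
  rcases hpo : (if p2 = ((cs.length : Nat) : Int) ∨ PySem.Chars.isspace (cs.getD p2.toNat ' ') then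
      (let t := PySem.Chars.rstrip
        (cs.take (if p2 = ((cs.length : Nat) : Int) then cs.length else p2.toNat + 1));
       if t = [] then none else some (t.length - 1))
    else some p2.toNat) with _ | pos
  · rfl
  · have hfacts := pvPos_facts cs p2 hp2b.1 hp2b.2 pos hpo
    have hnd' : ¬(pos = 0 ∧
        pvSepA cs (pvBuildMask cs cs.length (List.replicate cs.length false) 0) 0 = true) := by
      rintro ⟨h0, hsep0⟩
      apply hndD
      obtain ⟨hn1, hns, hall⟩ := hfacts.2 h0
      show D_extract_sql_under_cursor s c
      unfold D_extract_sql_under_cursor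
      simp only []
      rw [← hcs]
      have hpmax : max 0 (min c ((cs.length : Nat) : Int)) = p2 := by
        rw [hp2d]; split_ifs <;> omega
      rw [hpmax]
      exact ⟨hn1, hns, hall, pvSep0_D cs _ hsep0⟩
    exact pvMainLemma cs pos hfacts.1 hnd'

theorem extract_sql_under_cursor_changed : Claim_changed_extract_sql_under_cursor := by
  unfold Claim_changed_extract_sql_under_cursor; decide
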